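-- pv_equiv track=rewrite | github.com/mkPuzon/custom-RAG-models | prepare_context.py | get_min_max_ids
-- ===== SOURCE A (Python) =====
-- def get_min_max_ids(entry_ids, file_names, combined_groups, group_window_sz):
--
--     min_ids = []
--     max_ids = []
--
--     for group in combined_groups:
--         min_id = min([entry_ids[i] for i in group])
--         max_id = max([entry_ids[i] for i in group])
--
--         min_id = min_id - group_window_sz
--         max_id = max_id + group_window_sz
--
--         min_ids.append(min_id)
--         max_ids.append(max_id)
--
--     return min_ids, max_ids
-- ===== SOURCE B (Python) =====
-- def get_min_max_ids(entry_ids, file_names, combined_groups, group_window_sz):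
--     bounds = [sorted(entry_ids[i] for i in group) for group in combined_groups]
--     min_ids = [vals[0] - group_window_sz for vals in bounds]
--     max_ids = [vals[-1] + group_window_sz for vals in bounds]
--     return min_ids, max_ids
-- ===== Notes on version B (the rewrite author's own statement) =====
-- stated objective: alternative
-- what changed: B sorts each group's looked-up values once and reads the bounds off as the first and last element of the sorted list (staged map passes), instead of A's accumulating loop that calls min() and max() over two fresh comprehension lists per group; Pre_ excludes empty groups and out-of-range indices, where A raises ValueError/IndexError.
import Mathlib
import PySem

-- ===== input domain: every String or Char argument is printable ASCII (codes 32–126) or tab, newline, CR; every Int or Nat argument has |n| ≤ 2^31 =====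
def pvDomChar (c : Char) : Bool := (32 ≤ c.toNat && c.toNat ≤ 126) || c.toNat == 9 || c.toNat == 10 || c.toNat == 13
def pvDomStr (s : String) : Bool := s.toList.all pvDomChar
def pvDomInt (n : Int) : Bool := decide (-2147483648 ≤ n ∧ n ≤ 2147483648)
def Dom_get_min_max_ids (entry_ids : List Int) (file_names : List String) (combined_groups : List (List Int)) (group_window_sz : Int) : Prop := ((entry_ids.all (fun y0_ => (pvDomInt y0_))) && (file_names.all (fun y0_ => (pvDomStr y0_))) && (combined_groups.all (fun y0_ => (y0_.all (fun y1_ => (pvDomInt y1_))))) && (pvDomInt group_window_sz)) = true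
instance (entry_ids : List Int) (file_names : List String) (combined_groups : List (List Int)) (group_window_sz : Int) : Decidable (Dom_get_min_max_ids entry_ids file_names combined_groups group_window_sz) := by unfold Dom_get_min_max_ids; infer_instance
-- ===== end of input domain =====

-- B replaces A's per-group min()/max() calls by sorting each group's looked-up values once and
-- reading the bounds off as the sorted list's first and last element, staged as map passes
-- (alternative algorithm; same return value on Pre_).

-- ===== PORT A =====
-- A: accumulating loop; per group build the list of looked-up values, take min and max, pad by window.
-- pyGetD's default 0 is never used: Pre_ requires every index in Python's range (else IndexError);
-- min?/max? return none only on an empty group, excluded by Pre_ (Python's min([]) raises ValueError).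
def get_min_max_ids (entry_ids : List Int) (file_names : List String) (combined_groups : List (List Int)) (group_window_sz : Int) : List Int × List Int :=
  combined_groups.foldl
    (fun (acc : List Int × List Int) group =>
      let vals := group.map (fun i => PySem.List.pyGetD entry_ids i 0)
      let min_id := (PySem.List.min? vals (fun x => x)).getD 0
      let max_id := (PySem.List.max? vals (fun x => x)).getD 0
      (acc.1 ++ [min_id - group_window_sz], acc.2 ++ [max_id + group_window_sz]))
    ([], [])

-- ===== PORT B =====
-- B: sort each group's looked-up values (stage 1), then two comprehensions read vals[0] and vals[-1].
-- On an empty group Source B raises IndexError at vals[0]; such inputs are outside Pre_ and the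
-- port's pyGetD default is never used there inside Pre_.
def get_min_max_ids_alt (entry_ids : List Int) (file_names : List String) (combined_groups : List (List Int)) (group_window_sz : Int) : List Int × List Int :=
  let bounds := combined_groups.map
    (fun group => PySem.List.sorted (group.map (fun i => PySem.List.pyGetD entry_ids i 0)) (fun x => x) false)
  (bounds.map (fun vals => PySem.List.pyGetD vals 0 0 - group_window_sz),
   bounds.map (fun vals => PySem.List.pyGetD vals (-1) 0 + group_window_sz))

-- ===== PRECONDITION & SPEC =====
-- Pre_ excludes exactly the inputs where Python A raises: an empty group (ValueError from min([]))
-- or an index outside Python's range for entry_ids (IndexError).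
def Pre_get_min_max_ids (entry_ids : List Int) (file_names : List String) (combined_groups : List (List Int)) (group_window_sz : Int) : Prop :=
  ∀ g ∈ combined_groups, g ≠ [] ∧ ∀ i ∈ g, PySem.Raise.InRange entry_ids.length i
instance (entry_ids : List Int) (file_names : List String) (combined_groups : List (List Int)) (group_window_sz : Int) : Decidable (Pre_get_min_max_ids entry_ids file_names combined_groups group_window_sz) := by unfold Pre_get_min_max_ids; infer_instance
def pvWitness_get_min_max_ids : List Int × List String × List (List Int) × Int := ([3, 1, 7], ["x"], [[0, 2], [1]], 2)

def Spec_get_min_max_ids (entry_ids : List Int) (file_names : List String) (combined_groups : List (List Int)) (group_window_sz : Int) (out : List Int × List Int) : Prop := out = get_min_max_ids_alt entry_ids file_names combined_groups group_window_sz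
instance (entry_ids : List Int) (file_names : List String) (combined_groups : List (List Int)) (group_window_sz : Int) (out : List Int × List Int) : Decidable (Spec_get_min_max_ids entry_ids file_names combined_groups group_window_sz out) := by unfold Spec_get_min_max_ids; infer_instance

-- ===== CLAIM =====
def Claim_equal_get_min_max_ids : Prop := ∀ (entry_ids : List Int) (file_names : List String) (combined_groups : List (List Int)) (group_window_sz : Int), Dom_get_min_max_ids entry_ids file_names combined_groups group_window_sz → Pre_get_min_max_ids entry_ids file_names combined_groups group_window_sz → Spec_get_min_max_ids entry_ids file_names combined_groups group_window_sz (get_min_max_ids entry_ids file_names combined_groups group_window_sz)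

-- ===== LEMMAS AND PROOFS =====

-- A pairwise-≤ list's last element bounds every member (used for vals[-1] = max).
theorem le_getLast_of_pairwise (l : List Int) (h : l.Pairwise (· ≤ ·)) (y : Int)
    (hy : y ∈ l) (hne : l ≠ []) : y ≤ l.getLast hne := by
  obtain ⟨p, hp, rfl⟩ := List.mem_iff_getElem.mp hy
  rw [List.getLast_eq_getElem]
  rcases Nat.lt_or_ge p (l.length - 1) with hlt | hge
  · exact List.pairwise_iff_getElem.mp h p (l.length - 1) hp (by omega) hlt
  · have : p = l.length - 1 := by omega
    subst this; exact le_refl _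

-- head of the sorted value list is min(vals).
theorem sorted_head_eq_min (vals : List Int) (hne : vals ≠ []) :
    PySem.List.pyGetD (PySem.List.sorted vals (fun x => x) false) 0 0
      = (PySem.List.min? vals (fun x => x)).getD 0 := by
  obtain ⟨m, t, hs⟩ := List.exists_cons_of_ne_nil
    ((not_iff_not.mpr (PySem.List.sorted_eq_nil_iff vals (fun x => x) false)).mpr hne)
  obtain ⟨mn, hmn⟩ := Option.ne_none_iff_exists'.mp
    ((not_iff_not.mpr (PySem.List.min?_eq_none_iff vals (fun x => x))).mpr hne)
  rw [hs, PySem.List.pyGetD_zero_cons, hmn, Option.getD_some]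
  have hm_mem : m ∈ vals := (PySem.List.mem_sorted vals (fun x => x) false m).mp (by rw [hs]; exact List.mem_cons_self)
  have hmn_mem : mn ∈ vals := PySem.List.min?_mem hmn
  exact le_antisymm (PySem.List.key_head_sorted_le vals (fun x => x) hs mn hmn_mem)
                    (PySem.List.min?_isMin hmn m hm_mem)

-- last of the sorted value list is max(vals).
theorem sorted_last_eq_max (vals : List Int) (hne : vals ≠ []) :
    PySem.List.pyGetD (PySem.List.sorted vals (fun x => x) false) (-1) 0
      = (PySem.List.max? vals (fun x => x)).getD 0 := by
  have hsne : PySem.List.sorted vals (fun x => x) false ≠ [] :=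
    (not_iff_not.mpr (PySem.List.sorted_eq_nil_iff vals (fun x => x) false)).mpr hne
  obtain ⟨mx, hmx⟩ := Option.ne_none_iff_exists'.mp
    ((not_iff_not.mpr (PySem.List.max?_eq_none_iff vals (fun x => x))).mpr hne)
  rw [PySem.List.pyGetD_neg_one _ _ hsne, hmx, Option.getD_some]
  have hpw : (PySem.List.sorted vals (fun x => x) false).Pairwise (· ≤ ·) := by
    have := PySem.List.sorted_pairwise vals (fun x => x)
    simpa using this
  have hlast_mem : (PySem.List.sorted vals (fun x => x) false).getLast hsne ∈ vals :=
    (PySem.List.mem_sorted vals (fun x => x) false _).mp (List.getLast_mem hsne)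
  have hmx_mem : mx ∈ PySem.List.sorted vals (fun x => x) false :=
    (PySem.List.mem_sorted vals (fun x => x) false mx).mpr (PySem.List.max?_mem hmx)
  exact le_antisymm (PySem.List.max?_isMax hmx _ hlast_mem)
                    (le_getLast_of_pairwise _ hpw mx hmx_mem hsne)

-- A's accumulating pair-fold is the pair of maps.
theorem fold_eq_maps (gs : List (List Int)) (f g : List Int → Int) (l1 l2 : List Int) :
    gs.foldl (fun (acc : List Int × List Int) grp => (acc.1 ++ [f grp], acc.2 ++ [g grp])) (l1, l2)
      = (l1 ++ gs.map f, l2 ++ gs.map g) := by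
  induction gs generalizing l1 l2 with
  | nil => simp
  | cons grp t ih => simp [ih]

-- ===== VERDICT =====
theorem get_min_max_ids_spec : Claim_equal_get_min_max_ids := by
  intro entry_ids file_names combined_groups w _ hpre
  unfold Spec_get_min_max_ids get_min_max_ids get_min_max_ids_alt
  rw [fold_eq_maps combined_groups
    (fun grp => (PySem.List.min? (grp.map (fun i => PySem.List.pyGetD entry_ids i 0)) (fun x => x)).getD 0 - w)
    (fun grp => (PySem.List.max? (grp.map (fun i => PySem.List.pyGetD entry_ids i 0)) (fun x => x)).getD 0 + w)
    [] []]
  simp only [List.nil_append, List.map_map, Prod.mk.injEq]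
  constructor <;>
  · apply List.map_congr_left
    intro grp hgrp
    have hne : grp.map (fun i => PySem.List.pyGetD entry_ids i 0) ≠ [] := by
      simp [List.map_eq_nil_iff]; exact (hpre grp hgrp).1
    simp only [Function.comp]
    first
      | rw [sorted_head_eq_min _ hne]
      | rw [sorted_last_eq_max _ hne]
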